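-- pv_equiv track=rewrite | github.com/TeeKay-FourTwentyOne/math | ramsey-book-graphs/focused_d12_solver.py | get_pairs
-- ===== SOURCE A (Python) =====
-- def get_pairs(m):
--     pairs = []
--     seen = set()
--     for x in range(1, m):
--         if x not in seen:
--             pairs.append((x, (-x) % m))
--             seen.add(x)
--             seen.add((-x) % m)
--     return pairs
-- ===== SOURCE B (Python) =====
-- def get_pairs(m):
--     # each pair (x, m-x) with x in the lower half is produced exactly once,
--     # so no seen-set or membership test is needed
--     return [(x, m - x) for x in range(1, m // 2 + 1)]
-- ===== Notes on version B (the rewrite author's own statement) =====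
-- stated objective: simpler
-- what changed: Replaced the full range(1,m) scan with a seen-set and membership branch by a direct comprehension over the lower half range(1, m//2+1) emitting (x, m-x), so the dedup structure and the branch disappear.
import Mathlib
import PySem

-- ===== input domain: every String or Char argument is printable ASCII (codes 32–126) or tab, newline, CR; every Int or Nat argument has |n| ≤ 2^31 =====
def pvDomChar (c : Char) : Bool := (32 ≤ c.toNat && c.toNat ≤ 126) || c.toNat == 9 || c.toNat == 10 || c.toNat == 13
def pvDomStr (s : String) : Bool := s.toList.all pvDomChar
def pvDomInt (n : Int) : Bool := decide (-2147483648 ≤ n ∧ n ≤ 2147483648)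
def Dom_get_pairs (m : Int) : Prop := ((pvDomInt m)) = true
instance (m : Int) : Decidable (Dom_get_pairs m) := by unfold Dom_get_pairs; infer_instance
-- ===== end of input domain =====

-- B replaces A's full scan with a seen-set by a direct comprehension over the lower half: simpler, no dedup structure.

-- ===== PORT A =====
def get_pairs_step (m : Int) (st : List (Int × Int) × PySem.Set Int) (x : Int) :
    List (Int × Int) × PySem.Set Int :=
  if PySem.Set.contains st.2 x then st
  else (st.1 ++ [(x, PySem.Int.mod (-x) m)],
        PySem.Set.add (PySem.Set.add st.2 x) (PySem.Int.mod (-x) m))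

def get_pairs (m : Int) : List (Int × Int) :=
  ((PySem.List.pyRange 1 m 1).foldl (get_pairs_step m) ([], PySem.Set.empty)).1

-- ===== PORT B =====
def get_pairs_alt (m : Int) : List (Int × Int) :=
  (PySem.List.pyRange 1 (PySem.Int.floordiv m 2 + 1) 1).map (fun x => (x, m - x))

-- ===== PRECONDITION & SPEC =====
def Spec_get_pairs (m : Int) (out : List (Int × Int)) : Prop := out = get_pairs_alt m
instance (m : Int) (out : List (Int × Int)) : Decidable (Spec_get_pairs m out) := by unfold Spec_get_pairs; infer_instance

-- ===== CLAIM (what is proved, stated in full; the proofs are below) =====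
def Claim_equal_get_pairs : Prop := ∀ (m : Int), Dom_get_pairs m → Spec_get_pairs m (get_pairs m)

-- ===== LEMMAS AND PROOFS =====

lemma pv_mod_neg (m x : Int) (h1 : 1 ≤ x) (h2 : x < m) : PySem.Int.mod (-x) m = m - x := by
  rw [PySem.Int.mod_eq_emod_of_pos (by omega)]
  have h3 : (-x) % m = (-x + m * 1) % m := (Int.add_mul_emod_self_left (a := -x) (b := m) (c := 1)).symm
  rw [h3, show -x + m * 1 = m - x by ring, Int.emod_eq_of_lt (by omega) (by omega)]

lemma pv_foldl_fixed {α β : Type} (f : β → α → β) (s : β) (l : List α)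
    (h : ∀ x ∈ l, f s x = s) : l.foldl f s = s := by
  induction l with
  | nil => rfl
  | cons a t ih =>
      simp only [List.foldl_cons, h a (by simp)]
      exact ih (fun x hx => h x (by simp [hx]))

lemma pv_phase1 (m : Int) (hm : 2 ≤ m) (k : Nat) (hk : (k : Int) ≤ PySem.Int.floordiv m 2) :
    ∃ seen : PySem.Set Int,
      (PySem.List.pyRange 1 (1 + (k : Int)) 1).foldl (get_pairs_step m) ([], PySem.Set.empty)
        = ((PySem.List.pyRange 1 (1 + (k : Int)) 1).map (fun x => (x, m - x)), seen)
      ∧ ∀ y : Int, y ∈ seen ↔ (1 ≤ y ∧ y ≤ (k : Int)) ∨ (m - (k : Int) ≤ y ∧ y ≤ m - 1) := by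
  induction k with
  | zero =>
      refine ⟨PySem.Set.empty, ?_, ?_⟩
      · rw [PySem.List.pyRange_one_eq_nil (by omega)]; rfl
      · intro y; simp [PySem.Set.empty]; omega
  | succ k ih =>
      have hk' : (k : Int) ≤ PySem.Int.floordiv m 2 := by push_cast at hk ⊢; omega
      have hmk : ((k : Int) + 1) * 2 ≤ m := by
        have := (PySem.Int.le_floordiv_iff_mul_le (a := m) (b := 2)
          (q := (k : Int) + 1) (by omega)).mp (by push_cast at hk; omega)
        exact this
      obtain ⟨seen, hfold, hmem⟩ := ih hk'
      have hx : ((k : Int) + 1) ∉ seen := by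
        intro hy; rcases (hmem _).mp hy with ⟨_, _⟩ | ⟨_, _⟩ <;> omega
      have hsplit : PySem.List.pyRange 1 (1 + ((k : Nat) + 1 : Nat)) 1
          = PySem.List.pyRange 1 (1 + (k : Int)) 1 ++ [1 + (k : Int)] := by
        rw [show (1 + ((k : Nat) + 1 : Nat) : Int) = (1 + (k : Int)) + 1 by push_cast; ring]
        exact PySem.List.pyRange_one_succ_right (by omega)
      refine ⟨PySem.Set.add (PySem.Set.add seen (1 + (k : Int)))
               (PySem.Int.mod (-(1 + (k : Int))) m), ?_, ?_⟩
      · rw [hsplit, List.foldl_append, hfold, List.map_append]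
        simp only [List.foldl_cons, List.foldl_nil, get_pairs_step]
        rw [if_neg]
        · simp only [List.map_cons, List.map_nil]
          rw [pv_mod_neg m (1 + (k : Int)) (by omega) (by omega)]
        · rw [show (PySem.Set.contains seen (1 + (k : Int)) = true) ↔ _ from PySem.Set.contains_iff seen _]
          rw [show (1 + (k : Int)) = (k : Int) + 1 by ring]
          simpa using hx
      · intro y
        rw [pv_mod_neg m (1 + (k : Int)) (by omega) (by omega)]
        simp only [PySem.Set.mem_add, hmem]
        push_cast
        omega

lemma pv_phase2 (m : Int) (pairs : List (Int × Int)) (seen : PySem.Set Int)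
    (hmem : ∀ y : Int, y ∈ seen ↔ (1 ≤ y ∧ y ≤ PySem.Int.floordiv m 2)
        ∨ (m - PySem.Int.floordiv m 2 ≤ y ∧ y ≤ m - 1)) :
    (PySem.List.pyRange (PySem.Int.floordiv m 2 + 1) m 1).foldl (get_pairs_step m)
      (pairs, seen) = (pairs, seen) := by
  have hbr := (PySem.Int.floordiv_eq_iff_of_pos (a := m) (b := (2:Int))
      (q := PySem.Int.floordiv m 2) (by omega)).mp rfl
  apply pv_foldl_fixed
  intro x hx
  rw [PySem.List.mem_pyRange_one] at hx
  have hin : x ∈ seen := (hmem x).mpr (by omega)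
  simp only [get_pairs_step]
  rw [if_pos ((PySem.Set.contains_iff seen x).mpr hin)]

-- ===== VERDICT (by name: the statement is the Claim_ definition above) =====
theorem get_pairs_spec : Claim_equal_get_pairs := by
  intro m _
  unfold Spec_get_pairs get_pairs get_pairs_alt
  by_cases hm : m ≤ 1
  · have h0 : PySem.Int.floordiv m 2 < 1 := by
      rw [PySem.Int.floordiv_lt_iff_lt_mul (by omega)]; omega
    rw [PySem.List.pyRange_one_eq_nil (by omega),
        PySem.List.pyRange_one_eq_nil (by omega)]
    rfl
  · have hm2 : 2 ≤ m := by omega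
    have hbr := (PySem.Int.floordiv_eq_iff_of_pos (a := m) (b := (2:Int))
        (q := PySem.Int.floordiv m 2) (by omega)).mp rfl
    have h1 : 1 ≤ PySem.Int.floordiv m 2 := by omega
    set h : Int := PySem.Int.floordiv m 2 with hh
    have hcast : ((h.toNat : Int)) = h := Int.toNat_of_nonneg (by omega)
    obtain ⟨seen, hfold, hmem⟩ := pv_phase1 m hm2 h.toNat (by rw [hcast])
    rw [hcast] at hfold hmem
    rw [PySem.List.pyRange_one_append 1 (h + 1) m (by omega) (by omega),
        List.foldl_append, show (1 : Int) + h = h + 1 by ring] at *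
    rw [hfold, pv_phase2 m _ seen (by rw [← hh]; exact hmem)]
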